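-- pv_equiv track=rewrite | github.com/egoriwe999/s_and_p_blocks | p_block.py | p_block_inverse
-- ===== SOURCE A (Python) =====
-- def p_block_inverse(input_data):
--     table_inverse = [
--         3, 0, 2, 4, 6, 1, 7, 5
--     ]
--     output_data = 0
--     for i in range(8):
--         tetrad = (input_data >> i) & 0x1
--         output_data |= (tetrad << table_inverse[i])
--     return output_data
-- ===== SOURCE B (Python) =====
-- _TABLE_INVERSE = [3, 0, 2, 4, 6, 1, 7, 5]
--
--
-- def _permute_byte(v):
--     return sum(((v >> i) & 1) << _TABLE_INVERSE[i] for i in range(8))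
--
--
-- _LOOKUP = [_permute_byte(v) for v in range(256)]
--
--
-- def p_block_inverse(input_data):
--     return _LOOKUP[input_data % 256]
-- ===== Notes on version B (the rewrite author's own statement) =====
-- stated objective: idiomatic
-- what changed: The per-call bit-scatter loop is replaced by a single index into a lookup table with one entry per byte value, built once at module scope from the same bit permutation; the input's low byte (floor modulo the table size) selects the entry, matching A on negative and wide inputs.
import Mathlib
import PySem

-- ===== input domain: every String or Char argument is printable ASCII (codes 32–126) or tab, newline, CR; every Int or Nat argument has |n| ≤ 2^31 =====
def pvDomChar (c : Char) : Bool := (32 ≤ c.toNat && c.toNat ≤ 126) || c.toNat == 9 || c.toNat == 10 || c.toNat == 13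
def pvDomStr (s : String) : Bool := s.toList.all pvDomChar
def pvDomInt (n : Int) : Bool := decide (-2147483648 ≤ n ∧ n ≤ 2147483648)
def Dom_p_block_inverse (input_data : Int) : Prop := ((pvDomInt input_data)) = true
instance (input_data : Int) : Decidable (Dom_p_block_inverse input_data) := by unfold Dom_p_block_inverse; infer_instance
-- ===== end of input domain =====

-- B replaces the per-call bit-scatter loop by one lookup in a 256-entry table
-- built once at module scope from the same permutation (idiomatic P-box style).

-- ===== PORT A =====
-- literal transliteration of A's bit loop with |= accumulation; Python '>>'/'<<'
-- are Lean's '>>>'/'<<<' on Int, '&'/'|' are PySem.Int.band/bor (Python-exact).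
def p_block_inverse (input_data : Int) : Int :=
  let table_inverse : List Nat := [3, 0, 2, 4, 6, 1, 7, 5]
  (List.range 8).foldl
    (fun (output_data : Int) (i : Nat) =>
      let tetrad : Int := PySem.Int.band (input_data >>> i) 1
      PySem.Int.bor output_data (tetrad <<< (PySem.List.pyGetD table_inverse (i : Int) 0)))
    0

-- ===== PORT B =====
def pTableInverse : List Nat := [3, 0, 2, 4, 6, 1, 7, 5]

-- Source B's _permute_byte: sum of the scattered bits of one byte value
def pPermuteByte (v : Nat) : Int :=
  ((List.range 8).map
    (fun (i : Nat) => (PySem.Int.band ((v : Int) >>> i) 1) <<< (PySem.List.pyGetD pTableInverse (i : Int) 0))).sum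

-- Source B's module-scope table: _LOOKUP = [_permute_byte(v) for v in range(256)]
def pLookup : List Int := (List.range 256).map pPermuteByte

def p_block_inverse_alt (input_data : Int) : Int :=
  PySem.List.pyGetD pLookup (PySem.Int.mod input_data 256) 0

-- ===== PRECONDITION & SPEC =====
def Spec_p_block_inverse (input_data : Int) (out : Int) : Prop := out = p_block_inverse_alt input_data
instance (input_data : Int) (out : Int) : Decidable (Spec_p_block_inverse input_data out) := by unfold Spec_p_block_inverse; infer_instance

-- ===== CLAIM (what is proved, stated in full; the proofs are below) =====
def Claim_equal_p_block_inverse : Prop := ∀ (input_data : Int), Dom_p_block_inverse input_data → Spec_p_block_inverse input_data (p_block_inverse input_data)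

-- ===== LEMMAS AND PROOFS =====

-- each of the 8 low bits of n equals the corresponding bit of n % 256
lemma bit_mod256 (n : Int) (i : Nat) (hi : i < 8) :
    PySem.Int.band (n >>> i) 1 = PySem.Int.band (PySem.Int.mod n 256 >>> i) 1 := by
  rw [PySem.Int.band_one, PySem.Int.band_one,
      PySem.Int.mod_eq_emod_of_pos (by norm_num : (0:Int) < 256),
      Int.shiftRight_eq_div_pow, Int.shiftRight_eq_div_pow,
      PySem.Int.mod_eq_emod_of_pos (by norm_num : (0:Int) < 2),
      PySem.Int.mod_eq_emod_of_pos (by norm_num : (0:Int) < 2)]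
  interval_cases i <;> norm_num <;> omega

-- A's loop reads input_data only through those 8 bits, so A factors through n % 256
lemma A_mod256 (n : Int) :
    p_block_inverse n = p_block_inverse (PySem.Int.mod n 256) := by
  have h0 := bit_mod256 n 0 (by omega)
  have h1 := bit_mod256 n 1 (by omega)
  have h2 := bit_mod256 n 2 (by omega)
  have h3 := bit_mod256 n 3 (by omega)
  have h4 := bit_mod256 n 4 (by omega)
  have h5 := bit_mod256 n 5 (by omega)
  have h6 := bit_mod256 n 6 (by omega)
  have h7 := bit_mod256 n 7 (by omega)
  simp only [p_block_inverse, List.range_succ, List.range_zero, List.nil_append,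
    List.cons_append, List.foldl_cons, List.foldl_nil]
  rw [h0, h1, h2, h3, h4, h5, h6, h7]

-- kernel check: on every byte value A's bit loop computes B's table entry
set_option maxRecDepth 4000 in
lemma byte_all :
    ((List.range 256).all fun k => p_block_inverse (k : Int) == pPermuteByte k) = true := by
  rfl

lemma byte_agree (k : Nat) (hk : k < 256) :
    p_block_inverse ((k : Nat) : Int) = pPermuteByte k :=
  eq_of_beq (List.all_eq_true.mp byte_all k (List.mem_range.mpr hk))

-- ===== VERDICT (by name: the statement is the Claim_ definition above) =====
theorem p_block_inverse_spec : Claim_equal_p_block_inverse := by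
  intro n _
  unfold Spec_p_block_inverse p_block_inverse_alt
  have hmn : 0 ≤ PySem.Int.mod n 256 := PySem.Int.mod_nonneg n (by norm_num)
  have hml : PySem.Int.mod n 256 < 256 := PySem.Int.mod_lt n (by norm_num)
  have hcast : ((PySem.Int.mod n 256).toNat : Int) = PySem.Int.mod n 256 :=
    Int.toNat_of_nonneg hmn
  have hlook : PySem.List.pyGetD pLookup (PySem.Int.mod n 256) 0
      = pPermuteByte (PySem.Int.mod n 256).toNat := by
    rw [PySem.List.pyGetD_of_nonneg _ _ hmn]
    exact PySem.List.getD_map_range pPermuteByte 256 _ 0 (by omega)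
  rw [hlook, A_mod256 n, ← hcast]
  exact byte_agree (PySem.Int.mod n 256).toNat (by omega)
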